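-- pv_equiv track=rewrite | github.com/idiap/hallucination-detection | bart_gbp_scores.py | fix_alignments
-- ===== SOURCE A (Python) =====
-- def fix_alignments(alignments, fix_ngram):
--     """ Fixes the alignments of `fix_ngram`-grams that are consecutive in both the source and summary. """
--     is_fixed = [0] * len(alignments)
--     if fix_ngram <= 0:
--         return is_fixed
--     for i in range(len(alignments) - (fix_ngram - 1)):
--         if alignments[i] == -1:
--             continue
--
--         # fix alignment if generated n-gram is the same in source
--         if all([alignments[i + n] == alignments[i] + n for n in range(fix_ngram)]):
--             is_fixed[i:i + fix_ngram] = [1] * fix_ngram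
--     return is_fixed
-- ===== SOURCE B (Python) =====
-- def fix_alignments(alignments, fix_ngram):
--     """ Fixes the alignments of `fix_ngram`-grams that are consecutive in both the source and summary. """
--     n = len(alignments)
--     is_fixed = [0] * n
--     if fix_ngram <= 0:
--         return is_fixed
--     # chain[i] = length of the maximal run starting at i with consecutive +1 steps
--     chain = [1] * n
--     for i in range(n - 2, -1, -1):
--         if alignments[i + 1] == alignments[i] + 1:
--             chain[i] += chain[i + 1]
--     # single sweep: cover = rightmost position fixed by a qualifying start seen so far
--     cover = -1
--     for j in range(n):
--         if alignments[j] != -1 and chain[j] >= fix_ngram: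
--             cover = j + fix_ngram - 1
--         if j <= cover:
--             is_fixed[j] = 1
--     return is_fixed
-- ===== Notes on version B (the rewrite author's own statement) =====
-- stated objective: faster
-- what changed: Replaces the per-position n-gram re-check (each start rescans fix_ngram elements) by a backward pass computing consecutive +1 run lengths plus a single forward sweep tracking the rightmost covered position.
import Mathlib
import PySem

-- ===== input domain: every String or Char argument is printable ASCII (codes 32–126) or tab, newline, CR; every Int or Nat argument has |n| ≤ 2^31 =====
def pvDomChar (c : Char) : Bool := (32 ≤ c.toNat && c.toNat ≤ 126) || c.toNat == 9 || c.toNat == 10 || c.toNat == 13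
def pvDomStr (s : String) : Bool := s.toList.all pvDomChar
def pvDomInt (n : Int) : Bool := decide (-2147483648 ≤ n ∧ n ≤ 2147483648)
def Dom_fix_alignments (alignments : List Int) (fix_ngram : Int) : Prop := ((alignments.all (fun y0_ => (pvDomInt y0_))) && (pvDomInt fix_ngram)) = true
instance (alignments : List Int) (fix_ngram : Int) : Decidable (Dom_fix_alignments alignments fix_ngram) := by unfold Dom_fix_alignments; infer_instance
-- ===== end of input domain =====

-- B replaces A's per-start n-gram rescan by a backward run-length pass plus one forward covering sweep (faster: O(n) vs O(n*k)).

-- ===== PORT A =====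
-- loop body of A's `for i in range(...)`; the equal-length slice assignment
-- `is_fixed[i:i+fix_ngram] = [1]*fix_ngram` is the pointwise overwrite of positions i..i+fix_ngram-1
def pvStepA (alignments : List Int) (fix_ngram : Int) (acc : List Int) (i : Int) : List Int :=
  -- i is always a valid index here, so `pyGet?` is `some` (Python would raise IndexError otherwise)
  if PySem.List.pyGet? alignments i = some (-1) then acc
  else if (PySem.List.pyRange 0 fix_ngram 1).all
      (fun m => decide (PySem.List.pyGet? alignments (i + m)
        = (PySem.List.pyGet? alignments i).map (· + m))) then
    acc.mapIdx (fun j x => if (i ≤ (j : Int) ∧ (j : Int) < i + fix_ngram) then (1 : Int) else x)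
  else acc

def fix_alignments (alignments : List Int) (fix_ngram : Int) : List Int :=
  let is_fixed := List.replicate alignments.length (0 : Int)
  if fix_ngram ≤ 0 then is_fixed
  else (PySem.List.pyRange 0 ((alignments.length : Int) - (fix_ngram - 1)) 1).foldl
        (pvStepA alignments fix_ngram) is_fixed

-- ===== PORT B =====
-- Source B's backward pass: chain[i] = length of the maximal consecutive +1 run starting at i
def pvChains : List Int → List Int
  | [] => []
  | [_] => [1]
  | x :: y :: rest =>
    let t := pvChains (y :: rest)
    (if y = x + 1 then 1 + t.headI else 1) :: t

-- Source B's forward sweep over (alignments[j], chain[j]) pairs, carrying `cover`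
def pvSweep (k : Int) (cover : Int) (j : Nat) : List (Int × Int) → List Int
  | [] => []
  | (av, cv) :: rest =>
    let cover' := if av ≠ -1 ∧ k ≤ cv then (j : Int) + k - 1 else cover
    (if (j : Int) ≤ cover' then (1 : Int) else 0) :: pvSweep k cover' (j + 1) rest

def fix_alignments_alt (alignments : List Int) (fix_ngram : Int) : List Int :=
  if fix_ngram ≤ 0 then List.replicate alignments.length (0 : Int)
  else pvSweep fix_ngram (-1) 0 (alignments.zip (pvChains alignments))

-- ===== PRECONDITION & SPEC =====
def Spec_fix_alignments (alignments : List Int) (fix_ngram : Int) (out : List Int) : Prop := out = fix_alignments_alt alignments fix_ngram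
instance (alignments : List Int) (fix_ngram : Int) (out : List Int) : Decidable (Spec_fix_alignments alignments fix_ngram out) := by unfold Spec_fix_alignments; infer_instance

-- ===== CLAIM (what is proved, stated in full; the proofs are below) =====
def Claim_equal_fix_alignments : Prop := ∀ (alignments : List Int) (fix_ngram : Int), Dom_fix_alignments alignments fix_ngram → Spec_fix_alignments alignments fix_ngram (fix_alignments alignments fix_ngram)

-- ===== LEMMAS AND PROOFS =====

-- qualifying start: full in-range n-gram, not -1, arithmetic chain
def pvQ (a : List Int) (kn i : Nat) : Bool :=
  decide (i + kn ≤ a.length) && (a.getD i 0 != -1)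
    && (List.range kn).all (fun m => a.getD (i + m) 0 == a.getD i 0 + (m : Int))

-- common reference value: position j is marked iff some qualifying start covers it
def pvSpec (a : List Int) (kn : Nat) : List Int :=
  (List.range a.length).map (fun j =>
    if (List.range (j + 1)).any (fun i => pvQ a kn i && decide (j < i + kn)) then (1 : Int) else 0)

-- the chain test in A's loop body, rewritten over Nat indices
lemma pvAll_eq (a : List Int) (kn i : Nat) (hk1 : 1 ≤ kn) (hi : i + kn ≤ a.length) :
    ((PySem.List.pyRange 0 (kn : Int) 1).all
      (fun m => decide (PySem.List.pyGet? a ((i : Int) + m)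
        = (PySem.List.pyGet? a (i : Int)).map (· + m))))
    = (List.range kn).all (fun m => a.getD (i + m) 0 == a.getD i 0 + (m : Int)) := by
  have hin : i < a.length := by omega
  have hget : PySem.List.pyGet? a (i : Int) = some (a.getD i 0) := by
    rw [PySem.List.pyGet?_natCast, List.getElem?_eq_getElem hin, List.getD_eq_getElem a 0 hin]
  rw [PySem.List.pyRange_zero_nat, List.all_map]
  rw [Bool.eq_iff_iff]
  simp only [Function.comp, List.all_eq_true, List.mem_range, decide_eq_true_eq, beq_iff_eq]
  constructor
  · intro h m hm
    have h2 := h m hm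
    have hlt : i + m < a.length := by omega
    rw [hget, Option.map_some,
        show (i : Int) + (m : Nat) = ((i + m : Nat) : Int) by push_cast; ring,
        PySem.List.pyGet?_natCast, List.getElem?_eq_getElem hlt] at h2
    rw [List.getD_eq_getElem a 0 hlt]
    exact Option.some.inj h2
  · intro h m hm
    have h2 := h m hm
    have hlt : i + m < a.length := by omega
    rw [hget, Option.map_some,
        show (i : Int) + (m : Nat) = ((i + m : Nat) : Int) by push_cast; ring,
        PySem.List.pyGet?_natCast, List.getElem?_eq_getElem hlt]
    rw [List.getD_eq_getElem a 0 hlt] at h2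
    rw [h2]

lemma pvStepA_map (a : List Int) (kn : Nat) (hk1 : 1 ≤ kn) (i : Nat) (hi : i + kn ≤ a.length)
    (p : Nat → Bool) :
    pvStepA a (kn : Int) ((List.range a.length).map (fun j => if p j then (1 : Int) else 0)) (i : Int)
    = (List.range a.length).map
        (fun j => if (p j || (pvQ a kn i && decide (i ≤ j) && decide (j < i + kn))) then (1 : Int) else 0) := by
  have hin : i < a.length := by omega
  have hget : PySem.List.pyGet? a (i : Int) = some (a.getD i 0) := by
    rw [PySem.List.pyGet?_natCast, List.getElem?_eq_getElem hin, List.getD_eq_getElem a 0 hin]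
  unfold pvStepA
  by_cases hai : a.getD i 0 = -1
  · have hq : pvQ a kn i = false := by unfold pvQ; rw [hai]; simp
    rw [if_pos (by rw [hget, hai])]
    apply List.map_congr_left
    intro j hj
    simp [hq]
  · rw [if_neg (by rw [hget]; simpa using hai)]
    by_cases hc : (List.range kn).all (fun m => a.getD (i + m) 0 == a.getD i 0 + (m : Int)) = true
    · have hq : pvQ a kn i = true := by
        simp only [pvQ, hc, Bool.and_true, Bool.and_eq_true, decide_eq_true_eq, bne_iff_ne, ne_eq]
        exact ⟨hi, hai⟩
      rw [if_pos (by rw [pvAll_eq a kn i hk1 hi]; exact hc)]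
      apply List.ext_getElem
      · simp
      · intro j hj1 hj2
        simp only [List.getElem_mapIdx, List.getElem_map, List.getElem_range]
        rw [hq]
        by_cases hw : i ≤ j ∧ j < i + kn
        · rw [if_pos (by omega)]
          simp [hw.1, hw.2]
        · rw [if_neg (by omega)]
          rcases not_and_or.mp hw with h1 | h1
          · simp [h1]
          · simp [h1]
    · have hq : pvQ a kn i = false := by
        unfold pvQ
        apply Bool.eq_false_iff.mpr
        intro hx
        exact hc (by simp_all)
      rw [if_neg (by rw [pvAll_eq a kn i hk1 hi]; exact hc)]
      apply List.map_congr_left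
      intro j hj
      simp [hq]

lemma pvFoldA (a : List Int) (kn : Nat) (hk1 : 1 ≤ kn) :
    ∀ (l : List Nat) (p : Nat → Bool), (∀ i ∈ l, i + kn ≤ a.length) →
    (l.map (fun t : Nat => (t : Int))).foldl (pvStepA a (kn : Int))
        ((List.range a.length).map (fun j => if p j then (1 : Int) else 0))
    = (List.range a.length).map
        (fun j => if (p j || l.any (fun i => pvQ a kn i && decide (i ≤ j) && decide (j < i + kn)))
          then (1 : Int) else 0)
  | [], p, h => by simp
  | i :: l, p, h => by
    simp only [List.map_cons, List.foldl_cons]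
    rw [pvStepA_map a kn hk1 i (h i (by simp)) p]
    rw [pvFoldA a kn hk1 l _ (fun x hx => h x (by simp [hx]))]
    apply List.map_congr_left
    intro j hj
    simp only [List.any_cons]
    congr 1
    rw [Bool.or_assoc]

lemma pvA_eq (a : List Int) (k : Int) (hk : 1 ≤ k) :
    fix_alignments a k = pvSpec a k.toNat := by
  have hkn : k = (k.toNat : Int) := by omega
  set kn := k.toNat with hkdef
  have hk1 : 1 ≤ kn := by omega
  have hbase : List.replicate a.length (0 : Int)
      = (List.range a.length).map (fun j => if (fun _ => false) j then (1 : Int) else 0) := by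
    simp [List.map_const']
  unfold fix_alignments
  rw [if_neg (by omega), PySem.List.pyRange_one]
  simp only [Int.sub_zero, zero_add]
  rw [hbase, hkn]
  rw [pvFoldA a kn hk1 (List.range ((a.length : Int) - ((kn : Int) - 1)).toNat) (fun _ => false)
      (fun i hi => by simp only [List.mem_range] at hi; omega)]
  unfold pvSpec
  apply List.map_congr_left
  intro j hj
  rw [List.mem_range] at hj
  have hany : (List.range ((a.length : Int) - ((kn : Int) - 1)).toNat).any
        (fun i => pvQ a kn i && decide (i ≤ j) && decide (j < i + kn))
      = (List.range (j + 1)).any (fun i => pvQ a kn i && decide (j < i + kn)) := by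
    rw [Bool.eq_iff_iff]
    simp only [List.any_eq_true, List.mem_range, Bool.and_eq_true, decide_eq_true_eq]
    constructor
    · rintro ⟨i, _, ⟨⟨hqi, hle⟩, hlt⟩⟩
      exact ⟨i, by omega, hqi, hlt⟩
    · rintro ⟨i, hi1, hqi, hlt⟩
      have hbound : i + kn ≤ a.length := by
        have h1 : decide (i + kn ≤ a.length) = true := by
          have h2 := hqi
          simp only [pvQ, Bool.and_eq_true] at h2
          exact h2.1.1
        simpa using h1
      exact ⟨i, by omega, ⟨⟨hqi, by omega⟩, hlt⟩⟩
  rw [Bool.false_or, hany]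

lemma pvChains_length : ∀ (a : List Int), (pvChains a).length = a.length
  | [] => rfl
  | [_] => rfl
  | x :: y :: rest => by
    simp [pvChains, pvChains_length (y :: rest)]

lemma pvHeadI_eq_getD (l : List Int) (h : l ≠ []) : l.headI = l.getD 0 0 := by
  cases l with
  | nil => exact absurd rfl h
  | cons a l => rfl

lemma pvChains_pos : ∀ (a : List Int), ∀ i : Nat, i < a.length → (1 : Int) ≤ (pvChains a).getD i 0
  | [], i, hi => by simp at hi
  | [x], i, hi => by
    have : i = 0 := by simpa using hi
    subst this
    simp [pvChains]
  | x :: y :: rest, i, hi => by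
    match i with
    | 0 =>
      have h0 : (1 : Int) ≤ (pvChains (y :: rest)).getD 0 0 :=
        pvChains_pos (y :: rest) 0 (by simp)
      have hne : pvChains (y :: rest) ≠ [] := by
        have := pvChains_length (y :: rest)
        intro hnil
        rw [hnil] at this
        simp at this
      by_cases hy : y = x + 1
      · simp only [pvChains, List.getD_cons_zero, if_pos hy, pvHeadI_eq_getD _ hne]
        omega
      · simp [pvChains, hy]
    | (j + 1) =>
      simp only [pvChains, List.getD_cons_succ]
      exact pvChains_pos (y :: rest) j (by simpa using hi)

-- chain-length characterisation: chain[i] ≥ m ↔ m consecutive +1 steps fit at i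
lemma pvChains_ge : ∀ (a : List Int), ∀ i : Nat, i < a.length → ∀ m : Nat,
    ((m : Int) ≤ (pvChains a).getD i 0 ↔
      (i + m ≤ a.length ∧ ∀ t, t + 1 < m → a.getD (i + (t + 1)) 0 = a.getD (i + t) 0 + 1))
  | [], i, hi, m => by simp at hi
  | [x], i, hi, m => by
    have hi0 : i = 0 := by simpa using hi
    subst hi0
    simp only [pvChains, List.getD_cons_zero, List.length_cons, List.length_nil]
    constructor
    · intro h
      have hm : m ≤ 1 := by exact_mod_cast h
      exact ⟨by omega, fun t ht => by omega⟩
    · rintro ⟨h1, _⟩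
      have : m ≤ 1 := by omega
      exact_mod_cast Nat.cast_le.mpr this
  | x :: y :: rest, i, hi, m => by
    match i with
    | 0 =>
      by_cases hy : y = x + 1
      · have hne : pvChains (y :: rest) ≠ [] := by
          have := pvChains_length (y :: rest)
          intro hnil
          rw [hnil] at this
          simp at this
        have hc0 : (pvChains (x :: y :: rest)).getD 0 0
            = 1 + (pvChains (y :: rest)).getD 0 0 := by
          simp only [pvChains, List.getD_cons_zero, if_pos hy]
          rw [pvHeadI_eq_getD _ hne]
        rw [hc0]
        match m with
        | 0 =>
          have := pvChains_pos (y :: rest) 0 (by simp)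
          constructor
          · intro _
            exact ⟨by simp, fun t ht => by omega⟩
          · intro _
            omega
        | (s + 1) =>
          have ih := pvChains_ge (y :: rest) 0 (by simp) s
          simp only [Nat.zero_add] at ih
          constructor
          · intro h
            have hs : (s : Int) ≤ (pvChains (y :: rest)).getD 0 0 := by push_cast at h ⊢; omega
            obtain ⟨hb, hch⟩ := ih.mp hs
            refine ⟨by simp at hb ⊢; omega, fun t ht => ?_⟩
            match t with
            | 0 => simpa using hy
            | (u + 1) =>
              have := hch u (by omega)
              simpa [List.getD_cons_succ] using this
          · rintro ⟨hb, hch⟩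
            have hs : (s : Int) ≤ (pvChains (y :: rest)).getD 0 0 := by
              apply ih.mpr
              refine ⟨by simp at hb ⊢; omega, fun u hu => ?_⟩
              have := hch (u + 1) (by omega)
              simpa [List.getD_cons_succ] using this
            push_cast at hs ⊢
            omega
      · have hc0 : (pvChains (x :: y :: rest)).getD 0 0 = 1 := by
          simp [pvChains, hy]
        rw [hc0]
        constructor
        · intro h
          have hm : m ≤ 1 := by exact_mod_cast h
          refine ⟨by simp; omega, fun t ht => by omega⟩
        · rintro ⟨hb, hch⟩
          by_contra hcon
          have hm2 : 2 ≤ m := by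
            push_cast at hcon
            omega
          have := hch 0 (by omega)
          simp at this
          exact hy this
    | (j + 1) =>
      have hj : j < (y :: rest).length := by simpa using hi
      have ih := pvChains_ge (y :: rest) j hj m
      have hcs : (pvChains (x :: y :: rest)).getD (j + 1) 0
          = (pvChains (y :: rest)).getD j 0 := by
        simp [pvChains]
      rw [hcs, ih]
      constructor
      · rintro ⟨hb, hch⟩
        refine ⟨by simp at hb ⊢; omega, fun t ht => ?_⟩
        have := hch t ht
        have e1 : (j + 1) + (t + 1) = (j + (t + 1)) + 1 := by omega
        have e2 : (j + 1) + t = (j + t) + 1 := by omega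
        rw [e1, e2, List.getD_cons_succ, List.getD_cons_succ]
        exact this
      · rintro ⟨hb, hch⟩
        refine ⟨by simp at hb ⊢; omega, fun t ht => ?_⟩
        have := hch t ht
        have e1 : (j + 1) + (t + 1) = (j + (t + 1)) + 1 := by omega
        have e2 : (j + 1) + t = (j + t) + 1 := by omega
        rw [e1, e2, List.getD_cons_succ, List.getD_cons_succ] at this
        exact this

-- consecutive +1 steps telescope to A's arithmetic n-gram condition
lemma pvTelescope (a : List Int) (i : Nat) (kn : Nat) :
    (∀ t, t + 1 < kn → a.getD (i + (t + 1)) 0 = a.getD (i + t) 0 + 1) ↔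
    (∀ m < kn, a.getD (i + m) 0 = a.getD i 0 + (m : Int)) := by
  constructor
  · intro h m hm
    induction m with
    | zero => simp
    | succ s ih =>
      rw [h s (by omega), ih (by omega)]
      push_cast
      ring
  · intro h t ht
    rw [h (t + 1) (by omega), h t (by omega)]
    push_cast
    ring

lemma pvQ_iff (a : List Int) (kn : Nat) (i : Nat) (hi : i < a.length) :
    (a.getD i 0 ≠ -1 ∧ ((kn : Int) ≤ (pvChains a).getD i 0)) ↔ pvQ a kn i = true := by
  rw [pvChains_ge a i hi kn, pvTelescope]
  simp only [pvQ, Bool.and_eq_true, decide_eq_true_eq, bne_iff_ne, ne_eq, List.all_eq_true,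
    List.mem_range, beq_iff_eq]
  tauto

lemma pvSweep_spec (a : List Int) (kn : Nat) (hk1 : 1 ≤ kn) :
    ∀ (d j : Nat) (v : Int), a.length - j = d → v ≤ (j : Int) + (kn : Int) - 2 →
    pvSweep (kn : Int) v j ((a.zip (pvChains a)).drop j)
    = (List.range' j (a.length - j)).map
        (fun (jj : Nat) => if (decide ((jj : Int) ≤ v)
            || (List.range (jj + 1)).any (fun i => decide (j ≤ i) && pvQ a kn i && decide (jj < i + kn)))
          then (1 : Int) else 0) := by
  have hzlen : (a.zip (pvChains a)).length = a.length := by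
    rw [List.length_zip, pvChains_length]
    omega
  intro d
  induction d with
  | zero =>
    intro j v hd hv
    have hdrop : (a.zip (pvChains a)).drop j = [] := by
      apply List.drop_of_length_le
      omega
    rw [hdrop, hd]
    simp [pvSweep]
  | succ d ih =>
    intro j v hd hv
    have hj : j < a.length := by omega
    rw [List.drop_eq_getElem_cons (by omega : j < (a.zip (pvChains a)).length), List.getElem_zip]
    have hgd : a[j] = a.getD j 0 := (List.getD_eq_getElem a 0 hj).symm
    have hgc : (pvChains a)[j]'(by rw [pvChains_length]; exact hj)
        = (pvChains a).getD j 0 := (List.getD_eq_getElem _ 0 (by rw [pvChains_length]; exact hj)).symm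
    simp only [pvSweep, hgd, hgc]
    rw [show a.length - j = d + 1 from hd, List.range'_succ]
    by_cases hQ : pvQ a kn j = true
    · have hcond : (a.getD j 0 ≠ -1 ∧ (kn : Int) ≤ (pvChains a).getD j 0) :=
        (pvQ_iff a kn j hj).mpr hQ
      rw [if_pos hcond]
      rw [ih (j + 1) ((j : Int) + (kn : Int) - 1) (by omega) (by push_cast; omega),
          show a.length - (j + 1) = d from by omega]
      rw [List.map_cons]
      congr 1
      · have hhead : ((j : Int) ≤ (j : Int) + (kn : Int) - 1) := by
          have : (1 : Int) ≤ (kn : Int) := by exact_mod_cast hk1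
          omega
        rw [if_pos hhead]
        have : (decide ((j : Int) ≤ v)
            || (List.range (j + 1)).any (fun i => decide (j ≤ i) && pvQ a kn i && decide (j < i + kn)))
            = true := by
          simp only [Bool.or_eq_true, List.any_eq_true, List.mem_range, Bool.and_eq_true,
            decide_eq_true_eq]
          right
          exact ⟨j, by omega, ⟨by omega, hQ⟩, by omega⟩
        rw [this, if_pos rfl]
      · apply List.map_congr_left
        intro jj hjj
        rw [List.mem_range'_1] at hjj
        congr 1
        rw [eq_iff_iff]
        simp only [Bool.or_eq_true, List.any_eq_true, List.mem_range, Bool.and_eq_true,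
          decide_eq_true_eq]
        constructor
        · rintro (h1 | ⟨i, hi1, ⟨hi2, hqi⟩, hi3⟩)
          · right
            exact ⟨j, by omega, ⟨by omega, hQ⟩, by omega⟩
          · right
            exact ⟨i, hi1, ⟨by omega, hqi⟩, hi3⟩
        · rintro (h1 | ⟨i, hi1, ⟨hi2, hqi⟩, hi3⟩)
          · left
            omega
          · by_cases hij : i = j
            · subst hij
              left
              omega
            · right
              exact ⟨i, hi1, ⟨by omega, hqi⟩, hi3⟩
    · have hcond : ¬(a.getD j 0 ≠ -1 ∧ (kn : Int) ≤ (pvChains a).getD j 0) := by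
        intro hx
        exact hQ ((pvQ_iff a kn j hj).mp hx)
      rw [if_neg hcond]
      rw [ih (j + 1) v (by omega) (by push_cast at hv ⊢; omega),
          show a.length - (j + 1) = d from by omega]
      rw [List.map_cons]
      congr 1
      · have hany : (List.range (j + 1)).any
            (fun i => decide (j ≤ i) && pvQ a kn i && decide (j < i + kn)) = false := by
          apply Bool.eq_false_iff.mpr
          intro hx
          simp only [List.any_eq_true, List.mem_range, Bool.and_eq_true, decide_eq_true_eq] at hx
          obtain ⟨i, hi1, ⟨hi2, hqi⟩, _⟩ := hx
          have : i = j := by omega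
          subst this
          exact hQ hqi
        rw [hany, Bool.or_false]
        by_cases hjv : (j : Int) ≤ v
        · rw [if_pos hjv, if_pos (by simpa using hjv)]
        · rw [if_neg hjv, if_neg (by simpa using hjv)]
      · apply List.map_congr_left
        intro jj hjj
        rw [List.mem_range'_1] at hjj
        congr 1
        rw [eq_iff_iff]
        simp only [Bool.or_eq_true, List.any_eq_true, List.mem_range, Bool.and_eq_true,
          decide_eq_true_eq]
        constructor
        · rintro (h1 | ⟨i, hi1, ⟨hi2, hqi⟩, hi3⟩)
          · left
            exact h1
          · right
            exact ⟨i, hi1, ⟨by omega, hqi⟩, hi3⟩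
        · rintro (h1 | ⟨i, hi1, ⟨hi2, hqi⟩, hi3⟩)
          · left
            exact h1
          · by_cases hij : i = j
            · subst hij
              exact absurd hqi hQ
            · right
              exact ⟨i, hi1, ⟨by omega, hqi⟩, hi3⟩

lemma pvB_eq (a : List Int) (k : Int) (hk : 1 ≤ k) :
    fix_alignments_alt a k = pvSpec a k.toNat := by
  have hkn : k = (k.toNat : Int) := by omega
  set kn := k.toNat with hkdef
  have hk1 : 1 ≤ kn := by omega
  unfold fix_alignments_alt
  rw [if_neg (by omega), hkn]
  rw [show a.zip (pvChains a) = (a.zip (pvChains a)).drop 0 from List.drop_zero.symm]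
  rw [pvSweep_spec a kn hk1 a.length 0 (-1) (by omega) (by push_cast; omega)]
  unfold pvSpec
  rw [show a.length - 0 = a.length from rfl, ← List.range_eq_range']
  apply List.map_congr_left
  intro jj hjj
  congr 1
  have h1 : decide ((jj : Int) ≤ -1) = false := by
    simp only [decide_eq_false_iff_not]
    omega
  rw [h1, Bool.false_or]
  rw [eq_iff_iff]
  simp only [List.any_eq_true, List.mem_range, Bool.and_eq_true, decide_eq_true_eq]
  constructor
  · rintro ⟨i, hh1, ⟨_, hq⟩, hh3⟩
    exact ⟨i, hh1, hq, hh3⟩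
  · rintro ⟨i, hh1, hq, hh3⟩
    exact ⟨i, hh1, ⟨Nat.zero_le i, hq⟩, hh3⟩

-- ===== VERDICT (by name: the statement is the Claim_ definition above) =====
theorem fix_alignments_spec : Claim_equal_fix_alignments := by
  intro a k _
  unfold Spec_fix_alignments
  by_cases hk : k ≤ 0
  · simp [fix_alignments, fix_alignments_alt, hk]
  · rw [pvA_eq a k (by omega), pvB_eq a k (by omega)]
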